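-- pv_equiv track=rewrite | github.com/siliunobi/DNS-Maude | Maude/attacks_vs_model_resolvers/utils.py | unchained_cname_chains
-- ===== SOURCE A (Python) =====
-- import string
--
-- ADDRESS_INTERMEDIARY = "'intermediary . 'com . root"
--
-- TARGET_ANS = "'target-ans . 'com . root"
--
-- FAKE_LABEL = "'fake"
--
-- def unchained_cname_chains(nb_labels=0, cname_chain_length=17, address_intermediary=ADDRESS_INTERMEDIARY,
--                            target_address=TARGET_ANS, ):
--     cname_chain_target = ""
--     cname_chain_intermediary = ""
--     alphabet = list(string.ascii_letters)
--
--     model_record = "< {current} , cname, testTTL, {next} >"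
--     labels_text = ""
--     for lab in reversed(range(nb_labels - 1)):
--         labels_text += FAKE_LABEL + str(lab) + " . "
--
--     current = labels_text + "'" + alphabet[0] + " . " + target_address
--     next = labels_text + "'" + alphabet[1] + " . " + address_intermediary
--
--     cname_chain_target += "\t\t" + model_record.format(current=current, next=next) + "\n"
--
--     # Start with target
--     for c in range(0, cname_chain_length - 1):
--         current = next
--
--         if c % 2 == 1:
--             next = labels_text + "'" + alphabet[c + 2] + " . " + address_intermediary
--             cname_chain_target += "\t\t" + model_record.format(current=current, next=next) + "\n"
--         else:
--             next = labels_text + "'" + alphabet[c + 2] + " . " + target_address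
--             cname_chain_intermediary += "\t\t" + model_record.format(current=current, next=next) + "\n"
--
--     return cname_chain_intermediary, cname_chain_target
-- ===== SOURCE B (Python) =====
-- import string
--
-- ADDRESS_INTERMEDIARY = "'intermediary . 'com . root"
--
-- TARGET_ANS = "'target-ans . 'com . root"
--
-- FAKE_LABEL = "'fake"
--
-- def unchained_cname_chains(nb_labels=0, cname_chain_length=17, address_intermediary=ADDRESS_INTERMEDIARY,
--                            target_address=TARGET_ANS, ):
--     letters = string.ascii_letters
--     labels_text = "".join(FAKE_LABEL + str(i) + " . " for i in reversed(range(nb_labels - 1)))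
--
--     def node(i):
--         address = target_address if i % 2 == 0 else address_intermediary
--         return labels_text + "'" + letters[i] + " . " + address
--
--     def record(j):
--         return "\t\t< " + node(j) + " , cname, testTTL, " + node(j + 1) + " >\n"
--
--     cname_chain_target = record(0) + "".join(
--         record(j) for j in range(1, cname_chain_length) if j % 2 == 0)
--     cname_chain_intermediary = "".join(
--         record(j) for j in range(1, cname_chain_length) if j % 2 == 1)
--     return cname_chain_intermediary, cname_chain_target
-- ===== Notes on version B (the rewrite author's own statement) =====
-- stated objective: simpler
-- what changed: Replaces the threaded current/next state machine with a closed-form node(i) helper (address chosen by i's parity) and builds each chain as a direct join of record(j) over even/odd j, eliminating the mutable loop state and the in-loop branch.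
import Mathlib
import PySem

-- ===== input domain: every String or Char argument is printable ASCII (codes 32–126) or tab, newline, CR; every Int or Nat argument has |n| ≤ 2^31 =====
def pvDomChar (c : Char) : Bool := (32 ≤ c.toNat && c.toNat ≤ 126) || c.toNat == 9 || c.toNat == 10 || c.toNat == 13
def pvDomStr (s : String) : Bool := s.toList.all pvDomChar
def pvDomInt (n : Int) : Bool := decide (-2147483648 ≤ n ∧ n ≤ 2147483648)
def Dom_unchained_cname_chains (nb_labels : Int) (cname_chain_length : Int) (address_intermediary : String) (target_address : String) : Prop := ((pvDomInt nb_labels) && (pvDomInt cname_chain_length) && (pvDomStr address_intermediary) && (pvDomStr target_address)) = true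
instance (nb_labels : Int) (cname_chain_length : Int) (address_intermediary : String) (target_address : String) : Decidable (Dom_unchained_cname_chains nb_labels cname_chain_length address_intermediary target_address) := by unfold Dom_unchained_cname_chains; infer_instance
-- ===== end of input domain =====

-- B replaces A's threaded current/next state machine by a closed-form node(i) helper and
-- direct joins of record(j) over even/odd j (objective: simpler; same O(n) cost).


-- list(string.ascii_letters), shared literal
def pvAlphabet : List Char := "abcdefghijklmnopqrstuvwxyzABCDEFGHIJKLMNOPQRSTUVWXYZ".toList

-- ===== PORT A =====
-- loop body of A's for-loop, named for the fold (state = (current, next, target, intermediary));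
-- '.format' with two placeholders is ported as the corresponding concatenation (exact).
def pvStepA (labels it ta : List Char) (st : List Char × List Char × List Char × List Char) (c : Int) :
    List Char × List Char × List Char × List Char :=
  let current := st.2.1
  if PySem.Int.mod c 2 == 1 then
    let next := labels ++ ['\''] ++ [PySem.List.pyGetD pvAlphabet (c + 2) '?'] ++ " . ".toList ++ it
    (current, next,
      st.2.2.1 ++ "\t\t".toList ++ ("< ".toList ++ current ++ " , cname, testTTL, ".toList ++ next ++ " >".toList) ++ "\n".toList,
      st.2.2.2)
  else
    let next := labels ++ ['\''] ++ [PySem.List.pyGetD pvAlphabet (c + 2) '?'] ++ " . ".toList ++ ta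
    (current, next,
      st.2.2.1,
      st.2.2.2 ++ "\t\t".toList ++ ("< ".toList ++ current ++ " , cname, testTTL, ".toList ++ next ++ " >".toList) ++ "\n".toList)

def unchained_cname_chains (nb_labels : Int) (cname_chain_length : Int) (address_intermediary : String) (target_address : String) : String × String :=
  let labels_text := ((PySem.List.pyRange 0 (nb_labels - 1) 1).reverse).foldl
      (fun acc lab => acc ++ "'fake".toList ++ PySem.Int.toChars lab ++ " . ".toList) []
  let current := labels_text ++ ['\''] ++ [PySem.List.pyGetD pvAlphabet 0 '?'] ++ " . ".toList ++ target_address.toList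
  let next := labels_text ++ ['\''] ++ [PySem.List.pyGetD pvAlphabet 1 '?'] ++ " . ".toList ++ address_intermediary.toList
  let tgt0 := ([] : List Char) ++ "\t\t".toList ++ ("< ".toList ++ current ++ " , cname, testTTL, ".toList ++ next ++ " >".toList) ++ "\n".toList
  let fin := (PySem.List.pyRange 0 (cname_chain_length - 1) 1).foldl
      (pvStepA labels_text address_intermediary.toList target_address.toList)
      (current, next, tgt0, ([] : List Char))
  (String.ofList fin.2.2.2, String.ofList fin.2.2.1)

-- ===== PORT B =====
def pvNode (labels it ta : List Char) (i : Int) : List Char :=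
  labels ++ ['\''] ++ [PySem.List.pyGetD pvAlphabet i '?'] ++ " . ".toList ++
    (if PySem.Int.mod i 2 == 0 then ta else it)

def pvRecord (labels it ta : List Char) (j : Int) : List Char :=
  "\t\t< ".toList ++ pvNode labels it ta j ++ " , cname, testTTL, ".toList ++ pvNode labels it ta (j + 1) ++ " >\n".toList

def unchained_cname_chains_alt (nb_labels : Int) (cname_chain_length : Int) (address_intermediary : String) (target_address : String) : String × String :=
  let labels_text := ((PySem.List.pyRange 0 (nb_labels - 1) 1).reverse).flatMap
      (fun i => "'fake".toList ++ PySem.Int.toChars i ++ " . ".toList)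
  let it := address_intermediary.toList
  let ta := target_address.toList
  let tgt := pvRecord labels_text it ta 0 ++
      ((PySem.List.pyRange 1 cname_chain_length 1).filter (fun j => PySem.Int.mod j 2 == 0)).flatMap (pvRecord labels_text it ta)
  let itm := ((PySem.List.pyRange 1 cname_chain_length 1).filter (fun j => PySem.Int.mod j 2 == 1)).flatMap (pvRecord labels_text it ta)
  (String.ofList itm, String.ofList tgt)

-- ===== PRECONDITION & SPEC =====
-- Pre_ excludes exactly the inputs where Python A raises IndexError (alphabet[c+2] past the 52 ascii letters).
def Pre_unchained_cname_chains (nb_labels : Int) (cname_chain_length : Int) (address_intermediary : String) (target_address : String) : Prop :=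
  cname_chain_length ≤ 51
instance (nb_labels : Int) (cname_chain_length : Int) (address_intermediary : String) (target_address : String) : Decidable (Pre_unchained_cname_chains nb_labels cname_chain_length address_intermediary target_address) := by unfold Pre_unchained_cname_chains; infer_instance

def pvWitness_unchained_cname_chains : Int × Int × String × String := (2, 3, "'i . root", "'t . root")

def Spec_unchained_cname_chains (nb_labels : Int) (cname_chain_length : Int) (address_intermediary : String) (target_address : String) (out : String × String) : Prop := out = unchained_cname_chains_alt nb_labels cname_chain_length address_intermediary target_address
instance (nb_labels : Int) (cname_chain_length : Int) (address_intermediary : String) (target_address : String) (out : String × String) : Decidable (Spec_unchained_cname_chains nb_labels cname_chain_length address_intermediary target_address out) := by unfold Spec_unchained_cname_chains; infer_instance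

-- ===== CLAIM (what is proved, stated in full; the proofs are below) =====
def Claim_equal_unchained_cname_chains : Prop := ∀ (nb_labels : Int) (cname_chain_length : Int) (address_intermediary : String) (target_address : String), Dom_unchained_cname_chains nb_labels cname_chain_length address_intermediary target_address → Pre_unchained_cname_chains nb_labels cname_chain_length address_intermediary target_address → Spec_unchained_cname_chains nb_labels cname_chain_length address_intermediary target_address (unchained_cname_chains nb_labels cname_chain_length address_intermediary target_address)

-- ===== LEMMAS AND PROOFS =====

theorem pv_witness_ok :
    Dom_unchained_cname_chains (pvWitness_unchained_cname_chains.1) (pvWitness_unchained_cname_chains.2.1) (pvWitness_unchained_cname_chains.2.2.1) (pvWitness_unchained_cname_chains.2.2.2) ∧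
    Pre_unchained_cname_chains (pvWitness_unchained_cname_chains.1) (pvWitness_unchained_cname_chains.2.1) (pvWitness_unchained_cname_chains.2.2.1) (pvWitness_unchained_cname_chains.2.2.2) := by
  decide

-- the loop invariant: after folding over range(0, n) the state is
-- (node n, node (n+1), T ++ evens records of j ∈ [1, n], I ++ odd records of j ∈ [1, n])
-- parity of PySem.Int.mod at nonnegative arguments
theorem mod_two_of_even (c : Int) (h : c % 2 = 0) : PySem.Int.mod c 2 = 0 := by
  rw [PySem.Int.mod_eq_emod_of_pos (show (0 : Int) < 2 by omega)]; omega

theorem mod_two_of_odd (c : Int) (h : c % 2 = 1) : PySem.Int.mod c 2 = 1 := by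
  rw [PySem.Int.mod_eq_emod_of_pos (show (0 : Int) < 2 by omega)]; omega

-- one step of A's loop, expressed through B's node/record helpers
theorem stepA_eq (labels it ta : List Char) (c : Int) (T I : List Char) :
    pvStepA labels it ta (pvNode labels it ta c, pvNode labels it ta (c + 1), T, I) c
    = (pvNode labels it ta (c + 1), pvNode labels it ta (c + 2),
       if PySem.Int.mod c 2 == 1 then T ++ pvRecord labels it ta (c + 1) else T,
       if PySem.Int.mod c 2 == 1 then I else I ++ pvRecord labels it ta (c + 1)) := by
  rw [show c + 2 = c + 1 + 1 from by ring]
  rcases Int.emod_two_eq_zero_or_one c with h | h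
  · have e0 := mod_two_of_even c h
    have e1 := mod_two_of_odd (c + 1) (by omega)
    have e2 := mod_two_of_even (c + 1 + 1) (by omega)
    simp only [pvStepA, pvNode, pvRecord, e0, e1, e2]
    simp [List.append_assoc]
    ring_nf
  · have e0 := mod_two_of_odd c h
    have e1 := mod_two_of_even (c + 1) (by omega)
    have e2 := mod_two_of_odd (c + 1 + 1) (by omega)
    simp only [pvStepA, pvNode, pvRecord, e0, e1, e2]
    simp [List.append_assoc]
    ring_nf

-- the loop invariant: after folding over range(0, n) the state is
-- (node n, node (n+1), T ++ even-j records of j ∈ [1, n], I ++ odd-j records of j ∈ [1, n])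
theorem loopA (labels it ta : List Char) (n : Nat) (T I : List Char) :
    (PySem.List.pyRange 0 (n : Int) 1).foldl (pvStepA labels it ta)
      (pvNode labels it ta 0, pvNode labels it ta 1, T, I)
    = (pvNode labels it ta (n : Int), pvNode labels it ta ((n : Int) + 1),
       T ++ ((PySem.List.pyRange 1 ((n : Int) + 1) 1).filter (fun j => PySem.Int.mod j 2 == 0)).flatMap (pvRecord labels it ta),
       I ++ ((PySem.List.pyRange 1 ((n : Int) + 1) 1).filter (fun j => PySem.Int.mod j 2 == 1)).flatMap (pvRecord labels it ta)) := by
  induction n with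
  | zero =>
    simp [PySem.List.pyRange_one_eq_nil]
  | succ n ih =>
    have h1 : ((n + 1 : Nat) : Int) = (n : Int) + 1 := by push_cast; ring
    rw [h1, PySem.List.pyRange_one_succ_right (by positivity), List.foldl_append, ih,
      List.foldl_cons, List.foldl_nil, stepA_eq,
      PySem.List.pyRange_one_succ_right (show (1 : Int) ≤ (n : Int) + 1 by omega),
      List.filter_append, List.filter_append, List.flatMap_append, List.flatMap_append]
    rcases Int.emod_two_eq_zero_or_one (n : Int) with h | h
    · have hodd : ((n : Int) + 1) % 2 = 1 := by omega
      simp [h, hodd, List.append_assoc, show ((n : Int) + 2) = (n : Int) + 1 + 1 from by ring]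
    · have heven : ((n : Int) + 1) % 2 = 0 := by omega
      simp [h, heven, List.append_assoc, show ((n : Int) + 2) = (n : Int) + 1 + 1 from by ring]

-- ===== VERDICT (by name: the statement is the Claim_ definition above) =====
-- A's initial current/next/first-record in B's vocabulary
theorem init_cur (labels it ta : List Char) :
    labels ++ ['\''] ++ [PySem.List.pyGetD pvAlphabet 0 '?'] ++ " . ".toList ++ ta
    = pvNode labels it ta 0 := by
  simp [pvNode]

theorem init_next (labels it ta : List Char) :
    labels ++ ['\''] ++ [PySem.List.pyGetD pvAlphabet 1 '?'] ++ " . ".toList ++ it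
    = pvNode labels it ta 1 := by
  simp [pvNode]

theorem init_rec (labels it ta : List Char) :
    ([] : List Char) ++ "\t\t".toList ++ ("< ".toList ++ pvNode labels it ta 0 ++ " , cname, testTTL, ".toList ++ pvNode labels it ta 1 ++ " >".toList) ++ "\n".toList
    = pvRecord labels it ta 0 := by
  simp [pvRecord]

-- A's labels_text accumulation is B's flatMap
theorem labels_eq (l : List Int) :
    l.foldl (fun acc lab => acc ++ "'fake".toList ++ PySem.Int.toChars lab ++ " . ".toList) []
    = l.flatMap (fun i => "'fake".toList ++ PySem.Int.toChars i ++ " . ".toList) := by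
  have : (fun (acc : List Char) lab => acc ++ "'fake".toList ++ PySem.Int.toChars lab ++ " . ".toList)
      = fun acc lab => acc ++ ("'fake".toList ++ PySem.Int.toChars lab ++ " . ".toList) := by
    funext acc lab; simp [List.append_assoc]
  rw [this, PySem.List.foldl_append_eq_flatMap]
  simp

-- ===== VERDICT (by name: the statement is the Claim_ definition above) =====
theorem unchained_cname_chains_spec : Claim_equal_unchained_cname_chains := by
  intro nb L ai ta _ _
  unfold Spec_unchained_cname_chains unchained_cname_chains unchained_cname_chains_alt
  dsimp only
  rw [labels_eq, init_cur, init_next, init_rec]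
  set labels := ((PySem.List.pyRange 0 (nb - 1) 1).reverse).flatMap
      (fun i => "'fake".toList ++ PySem.Int.toChars i ++ " . ".toList) with hlab
  by_cases hL : L ≤ 1
  · rw [PySem.List.pyRange_one_eq_nil (by omega : L - 1 ≤ 0),
      PySem.List.pyRange_one_eq_nil (by omega : L ≤ 1)]
    simp
  · have hn : ((L - 1).toNat : Int) = L - 1 := Int.toNat_of_nonneg (by omega)
    have hA : PySem.List.pyRange 0 (L - 1) 1 = PySem.List.pyRange 0 (((L - 1).toNat : Nat) : Int) 1 := by rw [hn]
    have hB : (1 : Int) + ((L - 1).toNat : Int) = L := by omega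
    rw [hA, loopA]
    rw [show ((L - 1).toNat : Int) + 1 = L by omega]
    simp
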